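-- pv_equiv track=rewrite | github.com/rittamakdissi/DevConnect | DV/DevConnectproject/app/utils.py | normalize_specialization
-- ===== SOURCE A (Python) =====
-- STOP_WORDS = {
--     "developer", "engineer", "specialist", "expert", "consultant", "architect",
--     "coder", "programmer", "technologist", "professional", "dev", "technician",
--     "senior", "junior", "lead", "staff", "principal", "entry", "mid", "associate",
--     "software", "development", "programming", "master", "mastering", "ninja",
--     "rockstar", "guru", "enthusiast", "freelancer", "instructor", "certified",
-- }
--
-- def normalize_specialization(text):
--     if not text:
--         return set()
--
--     text = text.lower()
--
--     # 1. صنع نسخة مدمجة (إزالة الوصلات والشرطات تماماً)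
--     # "Full-Stack" -> "fullstack" | "Node.js" -> "nodejs"
--     text_compact = text.replace("-", "").replace("_", "").replace(".", "")
--
--     # 2. صنع نسخة مفككة (استبدال الرموز بمسافات)
--     # "Full-Stack" -> "full stack"
--     text_spaced = text
--     for ch in "-_./&()+,":
--         text_spaced = text_spaced.replace(ch, " ")
--
--     # 3. دمج النتائج في مجموعة واحدة
--     # إذا كتب المستخدم "React-Native" سيحصل النظام على: {"react", "native", "reactnative"}
--     words = set(text_spaced.split()) | set(text_compact.split())
--
--     return words - STOP_WORDS
-- ===== SOURCE B (Python) =====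
-- STOP_WORDS = {
--     "developer", "engineer", "specialist", "expert", "consultant", "architect",
--     "coder", "programmer", "technologist", "professional", "dev", "technician",
--     "senior", "junior", "lead", "staff", "principal", "entry", "mid", "associate",
--     "software", "development", "programming", "master", "mastering", "ninja",
--     "rockstar", "guru", "enthusiast", "freelancer", "instructor", "certified",
-- }
--
-- def normalize_specialization(text):
--     if not text:
--         return set()
--     tokens = text.lower().split()
--     result = set()
--     # one pass per whitespace token: split it on the symbol characters locally
--     for tok in tokens:
--         cur = ""
--         for c in tok:
--             if c in "-_./&()+,":
--                 if cur and cur not in STOP_WORDS: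
--                     result.add(cur)
--                 cur = ""
--             else:
--                 cur += c
--         if cur and cur not in STOP_WORDS:
--             result.add(cur)
--     # second pass: the compact form of each token (joiner characters deleted)
--     for tok in tokens:
--         compact = "".join(c for c in tok if c not in "-_.")
--         if compact and compact not in STOP_WORDS:
--             result.add(compact)
--     return result
-- ===== Notes on version B (the rewrite author's own statement) =====
-- stated objective: alternative
-- what changed: A builds two full rewritten copies of the whole text (one replace-chain deleting joiners, one replace-chain turning symbols into spaces) and splits each globally; B tokenizes the lowercased text once on whitespace and then, per token, emits the symbol-split pieces with a single character loop and the compact form with a per-token filter, adding them to the result set with the stop-word check inlined.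
import Mathlib
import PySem

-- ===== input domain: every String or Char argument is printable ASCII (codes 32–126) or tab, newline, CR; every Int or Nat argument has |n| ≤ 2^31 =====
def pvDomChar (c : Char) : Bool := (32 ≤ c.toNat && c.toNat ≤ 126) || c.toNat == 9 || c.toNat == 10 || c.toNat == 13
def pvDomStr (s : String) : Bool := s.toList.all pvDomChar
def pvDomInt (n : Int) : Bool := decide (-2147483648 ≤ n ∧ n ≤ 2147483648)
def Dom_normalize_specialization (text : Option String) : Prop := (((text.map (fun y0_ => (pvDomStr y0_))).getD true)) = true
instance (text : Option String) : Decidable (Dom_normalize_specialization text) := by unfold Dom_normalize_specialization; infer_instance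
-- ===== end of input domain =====

-- B replaces A's two global string rewrites (replace-chain, then split) by one tokenization plus
-- per-token character loops that emit the split pieces and the compact form locally (objective:
-- alternative decomposition, same asymptotic cost).

-- module constant STOP_WORDS (shared context of both implementations)
def STOP_WORDS : PySem.Set String := PySem.Set.ofList
  ["developer", "engineer", "specialist", "expert", "consultant", "architect",
   "coder", "programmer", "technologist", "professional", "dev", "technician",
   "senior", "junior", "lead", "staff", "principal", "entry", "mid", "associate",
   "software", "development", "programming", "master", "mastering", "ninja",
   "rockstar", "guru", "enthusiast", "freelancer", "instructor", "certified"]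

-- ===== PORT A =====
def normalize_specialization (text : Option String) : List String :=
  match text with
  | none => PySem.Set.empty
  | some t =>
    if t == "" then PySem.Set.empty
    else
      let tl := PySem.Str.lower t
      let compact := PySem.Str.replace (PySem.Str.replace (PySem.Str.replace tl "-" "") "_" "") "." ""
      let spaced := ("-_./&()+,".toList).foldl (fun s ch => PySem.Str.replace s (String.ofList [ch]) " ") tl
      let words := PySem.Set.union (PySem.Set.ofList (PySem.Str.split₀ spaced)) (PySem.Set.ofList (PySem.Str.split₀ compact))
      PySem.Set.diff words STOP_WORDS

-- ===== PORT B =====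
-- Source B's 'if cur and cur not in STOP_WORDS: result.add(cur)'
def bFlush (res : PySem.Set String) (cur : List Char) : PySem.Set String :=
  if cur.isEmpty then res
  else if STOP_WORDS.contains (String.ofList cur) then res
  else PySem.Set.add res (String.ofList cur)

-- the inner 'for c in tok' loop of Source B's first pass (state: result set, current piece)
def bInner (res : PySem.Set String) (cur : List Char) : List Char → PySem.Set String
  | [] => bFlush res cur
  | c :: cs =>
    if ("-_./&()+,".toList).contains c then bInner (bFlush res cur) [] cs
    else bInner res (cur ++ [c]) cs

def normalize_specialization_alt (text : Option String) : List String :=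
  match text with
  | none => PySem.Set.empty
  | some t =>
    if t == "" then PySem.Set.empty
    else
      let tokens := PySem.Str.split₀ (PySem.Str.lower t)
      let r1 := tokens.foldl (fun res tok => bInner res [] tok.toList) PySem.Set.empty
      tokens.foldl
        (fun res tok => bFlush res (tok.toList.filter (fun c => !(("-_.".toList).contains c)))) r1

-- ===== PRECONDITION & SPEC =====
def Spec_normalize_specialization (text : Option String) (out : List String) : Prop := out = normalize_specialization_alt text
instance (text : Option String) (out : List String) : Decidable (Spec_normalize_specialization text out) := by unfold Spec_normalize_specialization; infer_instance

-- ===== CLAIM (what is proved, stated in full; the proofs are below) =====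
def Claim_equal_normalize_specialization : Prop := ∀ (text : Option String), Dom_normalize_specialization text → Spec_normalize_specialization text (normalize_specialization text)

-- ===== LEMMAS AND PROOFS =====

def symB (c : Char) : Bool := ("-_./&()+,".toList).contains c

def delB (c : Char) : Bool := ("-_.".toList).contains c
def qB (c : Char) : Bool := PySem.Chars.isspace c || symB c

def nsplit (p : Char → Bool) : List Char → List (List Char)
  | [] => []
  | c :: cs =>
    if p c then nsplit p cs
    else (c :: cs.takeWhile (fun x => !p x)) :: nsplit p (cs.dropWhile (fun x => !p x))
termination_by cs => cs.length
decreasing_by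
  all_goals simp
  exact List.length_dropWhile_le (fun x => !p x) cs

theorem nsplit_nil (p : Char → Bool) : nsplit p [] = [] := by rw [nsplit.eq_def]
theorem nsplit_cons (p : Char → Bool) (c : Char) (cs : List Char) :
    nsplit p (c :: cs) =
      if p c then nsplit p cs
      else (c :: cs.takeWhile (fun x => !p x)) :: nsplit p (cs.dropWhile (fun x => !p x)) := by
  rw [nsplit.eq_def]
theorem twdw_congr {α : Type} (p q : α → Bool) (l : List α) (h : ∀ x ∈ l, p x = q x) :
    l.takeWhile p = l.takeWhile q ∧ l.dropWhile p = l.dropWhile q := by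
  induction l with
  | nil => simp
  | cons x l ih =>
    have hx := h x (by simp)
    have ih' := ih fun y hy => h y (by simp [hy])
    by_cases hp : p x = true <;>
      simp [List.takeWhile_cons, List.dropWhile_cons, hp, ← hx, ih'.1, ih'.2]
theorem ns_congr (p q : Char → Bool) (cs : List Char) (h : ∀ c ∈ cs, p c = q c) :
    nsplit p cs = nsplit q cs := by
  induction cs using nsplit.induct (p := p) with
  | case1 => simp [nsplit_nil]
  | case2 c cs hp ih =>
    rw [nsplit_cons, nsplit_cons, if_pos hp, if_pos ((h c (by simp)) ▸ hp)]
    exact ih fun x hx => h x (by simp [hx])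
  | case3 c cs hp ih =>
    have hq : ¬ q c = true := by rw [← h c (by simp)]; exact hp
    have htw : cs.takeWhile (fun x => !p x) = cs.takeWhile (fun x => !q x) := by
      refine (twdw_congr _ _ cs fun x hx => ?_).1; simp [h x (by simp [hx])]
    have hdw : cs.dropWhile (fun x => !p x) = cs.dropWhile (fun x => !q x) := by
      refine (twdw_congr _ _ cs fun x hx => ?_).2; simp [h x (by simp [hx])]
    rw [nsplit_cons, nsplit_cons, if_neg hp, if_neg hq, htw, ← hdw]
    rw [ih fun x hx => h x ((List.dropWhile_sublist _).subset hx |> List.mem_cons_of_mem c)]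
theorem ns_members (p : Char → Bool) (cs : List Char) (g : List Char) (hg : g ∈ nsplit p cs) :
    ∀ c ∈ g, p c = false := by
  induction cs using nsplit.induct (p := p) with
  | case1 => simp [nsplit_nil] at hg
  | case2 c cs hp ih => rw [nsplit_cons, if_pos hp] at hg; exact ih hg
  | case3 c cs hp ih =>
    rw [nsplit_cons, if_neg hp] at hg
    rcases List.mem_cons.1 hg with h | h
    · subst h; intro x hx
      rcases List.mem_cons.1 hx with rfl | hx
      · simpa using hp
      · simpa using List.mem_takeWhile_imp hx
    · exact ih h

theorem ns_ne (p : Char → Bool) (cs : List Char) (g : List Char) (hg : g ∈ nsplit p cs) :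
    g ≠ [] := by
  induction cs using nsplit.induct (p := p) with
  | case1 => simp [nsplit_nil] at hg
  | case2 c cs hp ih => rw [nsplit_cons, if_pos hp] at hg; exact ih hg
  | case3 c cs hp ih =>
    rw [nsplit_cons, if_neg hp] at hg
    rcases List.mem_cons.1 hg with h | h
    · subst h; simp
    · exact ih h

theorem ns_decomp (p : Char → Bool) (cs : List Char) :
    nsplit p cs =
      (if cs.takeWhile (fun x => !p x) = [] then [] else [cs.takeWhile (fun x => !p x)]) ++
        nsplit p (cs.dropWhile (fun x => !p x)) := by
  cases cs with
  | nil => simp [nsplit_nil]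
  | cons x xs =>
    by_cases hp : p x = true
    · simp [List.takeWhile_cons, List.dropWhile_cons, hp, nsplit_cons]
    · have hp' : (!p x) = true := by simp [hp]
      rw [nsplit_cons, if_neg hp]
      simp only [List.takeWhile_cons, List.dropWhile_cons, hp']
      simp

theorem split₀_go_spec : ∀ (l cur : List Char) (acc : List (List Char)),
    PySem.Chars.split₀.go l cur acc =
      acc.reverse ++
        (if cur.isEmpty then nsplit PySem.Chars.isspace l
         else (cur.reverse ++ l.takeWhile (fun x => !PySem.Chars.isspace x)) ::
            nsplit PySem.Chars.isspace (l.dropWhile (fun x => !PySem.Chars.isspace x))) := by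
  intro l
  induction l with
  | nil =>
    intro cur acc
    by_cases hc : cur.isEmpty <;> simp [PySem.Chars.split₀.go, hc, nsplit_nil]
  | cons c rest ih =>
    intro cur acc
    by_cases hs : PySem.Chars.isspace c
    · by_cases hc : cur.isEmpty
      · rw [PySem.Chars.split₀.go]
        simp only [hs, if_pos, hc, if_true, ite_true]
        rw [ih [] acc]
        simp [nsplit_cons, hs, hc]
      · rw [PySem.Chars.split₀.go]
        simp only [hs, hc, ite_true, ite_false, if_true]
        rw [ih [] (cur.reverse :: acc)]
        have hc' : cur ≠ [] := by simpa [List.isEmpty_iff] using hc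
        simp [nsplit_cons, hs, hc, List.takeWhile_cons, List.dropWhile_cons]
    · rw [PySem.Chars.split₀.go]
      simp only [hs, ite_false, if_false]
      rw [ih (c :: cur) acc]
      have hs' : (!PySem.Chars.isspace c) = true := by simp [hs]
      by_cases hc : cur.isEmpty
      · have : cur = [] := by simpa [List.isEmpty_iff] using hc
        subst this
        simp [nsplit_cons, hs, List.takeWhile_cons, List.dropWhile_cons, hs']
      · simp [nsplit_cons, hs, List.takeWhile_cons, List.dropWhile_cons, hs', hc]

theorem split₀_eq (cs : List Char) : PySem.Chars.split₀ cs = nsplit PySem.Chars.isspace cs := by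
  have := split₀_go_spec cs [] []
  simpa [PySem.Chars.split₀] using this
theorem replace_go_single (a b : Char) : ∀ (l acc : List Char),
    PySem.Chars.replace.go [a] [b] l.length l acc =
      acc.reverse ++ l.map (fun c => if c = a then b else c) := by
  intro l
  induction l with
  | nil => intro acc; rw [List.length_nil, PySem.Chars.replace.go]; simp
  | cons c t ih =>
    intro acc
    rw [List.length_cons, PySem.Chars.replace.go]
    by_cases h : c = a
    · subst h
      have hp : [c].isPrefixOf (c :: t) = true := by simp [List.isPrefixOf]
      simp only [hp, if_true, ite_true]
      simpa using ih (b :: acc)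
    · have hp : ¬ ([a].isPrefixOf (c :: t) = true) := by
        simp [List.isPrefixOf]; exact fun hh => h (hh ▸ rfl)
      simp only [hp, ite_false, if_false]
      rw [ih (c :: acc)]
      simp [h]

theorem replace_single (a b : Char) (cs : List Char) :
    PySem.Chars.replace cs [a] [b] = cs.map (fun c => if c = a then b else c) := by
  rw [PySem.Chars.replace]
  simp only [List.isEmpty_iff, reduceCtorEq, if_false]
  simpa using replace_go_single a b cs []

theorem replace_go_del (a : Char) : ∀ (l acc : List Char),
    PySem.Chars.replace.go [a] [] l.length l acc =
      acc.reverse ++ l.filter (fun c => !(c == a)) := by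
  intro l
  induction l with
  | nil => intro acc; rw [List.length_nil, PySem.Chars.replace.go]; simp
  | cons c t ih =>
    intro acc
    rw [List.length_cons, PySem.Chars.replace.go]
    by_cases h : c = a
    · subst h
      have hp : [c].isPrefixOf (c :: t) = true := by simp [List.isPrefixOf]
      simp only [hp, if_true, ite_true]
      rw [show ([] : List Char).reverse ++ acc = acc by simp]
      simpa using ih acc
    · have hp : ¬ ([a].isPrefixOf (c :: t) = true) := by
        simp [List.isPrefixOf]; exact fun hh => h (hh ▸ rfl)
      simp only [hp, ite_false, if_false]
      rw [ih (c :: acc)]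
      simp [h]

theorem replace_del (a : Char) (cs : List Char) :
    PySem.Chars.replace cs [a] [] = cs.filter (fun c => !(c == a)) := by
  rw [PySem.Chars.replace]
  simp only [List.isEmpty_iff, reduceCtorEq, if_false]
  simpa using replace_go_del a cs []
theorem map1 (p : Char → Bool) (hq : p ' ' = true) (a : Char) (cs : List Char) :
    nsplit p (cs.map (fun c => if c = a then ' ' else c)) = nsplit (fun c => p c || c == a) cs := by
  induction cs using nsplit.induct (p := fun c => p c || c == a) with
  | case1 => simp [nsplit_nil]
  | case2 c cs hp ih =>
    have hpf : p (if c = a then ' ' else c) = true := by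
      by_cases h : c = a
      · simp [h, hq]
      · simp only [h, if_false]
        rcases Bool.or_eq_true_iff.1 hp with h' | h'
        · exact h'
        · exact absurd (by simpa using h') h
    rw [List.map_cons, nsplit_cons, if_pos hpf, nsplit_cons, if_pos hp]
    exact ih
  | case3 c cs hp ih =>
    have hca : ¬ c = a := fun h => hp (by simp [h])
    have hpc : ¬ p c = true := fun h => hp (by simp [h])
    have hfc : (if c = a then ' ' else c) = c := by simp [hca]
    have hcomp : ((fun x => !p x) ∘ fun c => if c = a then ' ' else c) =
        (fun c => !(p c || c == a)) := by
      funext x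
      by_cases h : x = a <;> simp [h, hq]
    rw [List.map_cons, hfc, nsplit_cons, if_neg hpc, nsplit_cons, if_neg hp]
    rw [List.takeWhile_map, List.dropWhile_map, hcomp]
    have hmapid : ∀ x ∈ cs.takeWhile (fun c => !(p c || c == a)),
        (if x = a then ' ' else x) = x := by
      intro x hx
      have hmem := List.mem_takeWhile_imp hx
      have hxa : ¬ x = a := fun h => by simp [h] at hmem
      simp [hxa]
    rw [List.map_congr_left hmapid, List.map_id', ih]
theorem filt_take (p f : Char → Bool) (h : ∀ x, p x = true → f x = true) (l : List Char) :
    (l.filter f).takeWhile (fun x => !p x) = (l.takeWhile (fun x => !p x)).filter f := by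
  induction l with
  | nil => simp
  | cons x l ih =>
    by_cases hf : f x = true
    · by_cases hp : p x = true <;>
        simp [List.filter_cons, List.takeWhile_cons, hf, hp, ih]
    · have hp : ¬ p x = true := fun hp => hf (h x hp)
      simp [List.filter_cons, List.takeWhile_cons, hf, hp, ih]

theorem filt_drop (p f : Char → Bool) (h : ∀ x, p x = true → f x = true) (l : List Char) :
    (l.filter f).dropWhile (fun x => !p x) = (l.dropWhile (fun x => !p x)).filter f := by
  induction l with
  | nil => simp
  | cons x l ih =>
    by_cases hf : f x = true
    · by_cases hp : p x = true <;>
        simp [List.filter_cons, List.dropWhile_cons, hf, hp, ih]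
    · have hp : ¬ p x = true := fun hp => hf (h x hp)
      simp [List.filter_cons, List.dropWhile_cons, hf, hp, ih]

theorem filt (p f : Char → Bool) (h : ∀ x, p x = true → f x = true) (cs : List Char) :
    nsplit p (cs.filter f) = ((nsplit p cs).map (List.filter f)).filter (fun g => !g.isEmpty) := by
  induction hn : cs.length using Nat.strong_induction_on generalizing cs with
  | _ n ih =>
    subst hn
    cases cs with
    | nil => simp [nsplit_nil]
    | cons c cs =>
      by_cases hp : p c = true
      · have hf : f c = true := h c hp
        rw [List.filter_cons, if_pos hf, nsplit_cons, if_pos hp, nsplit_cons, if_pos hp]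
        exact ih cs.length (by simp) cs rfl
      · rw [nsplit_cons, if_neg hp]
        by_cases hf : f c = true
        · rw [List.filter_cons, if_pos hf, nsplit_cons, if_neg hp]
          rw [filt_take p f h, filt_drop p f h,
            ih _ (lt_of_le_of_lt (List.length_dropWhile_le (fun x => !p x) cs) (by simp))
              (cs.dropWhile (fun x => !p x)) rfl]
          simp [List.filter_cons, hf]
        · rw [List.filter_cons, if_neg hf, ih cs.length (by simp) cs rfl]
          conv_lhs => rw [ns_decomp p cs]
          by_cases ht : cs.takeWhile (fun x => !p x) = []
          · simp [ht, List.filter_cons, hf]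
          · simp only [ht, if_neg, ite_false]
            simp [List.filter_cons, hf]

theorem ns_append_sep (q : Char → Bool) (xs d : List Char)
    (hd : ∀ (h : d ≠ []), q (d.head h) = true) :
    nsplit q (xs ++ d) = nsplit q xs ++ nsplit q d := by
  induction hn : xs.length using Nat.strong_induction_on generalizing xs with
  | _ n ih =>
    subst hn
    cases xs with
    | nil => simp [nsplit_nil]
    | cons x xs =>
      by_cases hq : q x = true
      · rw [List.cons_append, nsplit_cons, if_pos hq, nsplit_cons, if_pos hq]
        exact ih xs.length (by simp) xs rfl
      · rw [List.cons_append, nsplit_cons, if_neg hq, nsplit_cons, if_neg hq]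
        have hdrop_d : d.dropWhile (fun c => !q c) = d := by
          cases d with
          | nil => rfl
          | cons y ys =>
            have hy := hd (by simp)
            simp only [List.head_cons] at hy
            simp [List.dropWhile_cons, hy]
        have htake_d : d.takeWhile (fun c => !q c) = [] := by
          cases d with
          | nil => rfl
          | cons y ys =>
            have hy := hd (by simp)
            simp only [List.head_cons] at hy
            simp [List.takeWhile_cons, hy]
        have htw : (xs ++ d).takeWhile (fun c => !q c) = xs.takeWhile (fun c => !q c) := by
          rw [List.takeWhile_append]
          split
          · next hlen =>
            rw [(List.takeWhile_sublist _).eq_of_length hlen, htake_d, List.append_nil]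
          · rfl
        have hdw : (xs ++ d).dropWhile (fun c => !q c) = xs.dropWhile (fun c => !q c) ++ d := by
          rw [List.dropWhile_append]
          split
          · next hemp =>
            rw [List.isEmpty_iff.1 hemp, List.nil_append, hdrop_d]
          · rfl
        rw [htw, hdw, List.cons_append]
        congr 1
        exact ih _ (lt_of_le_of_lt (List.length_dropWhile_le (fun c => !q c) xs) (by simp)) _ rfl
theorem flat (p q : Char → Bool) (himp : ∀ c, p c = true → q c = true) (cs : List Char) :
    nsplit q cs = (nsplit p cs).flatMap (nsplit q) := by
  induction hn : cs.length using Nat.strong_induction_on generalizing cs with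
  | _ n ih =>
    subst hn
    cases cs with
    | nil => simp [nsplit_nil]
    | cons c cs =>
      by_cases hp : p c = true
      · rw [nsplit_cons (p := p), if_pos hp, nsplit_cons (p := q), if_pos (himp c hp)]
        exact ih cs.length (by simp) cs rfl
      · rw [nsplit_cons (p := p), if_neg hp, List.flatMap_cons]
        set t := cs.takeWhile (fun x => !p x) with ht
        set d := cs.dropWhile (fun x => !p x) with hd
        have hcs : cs = t ++ d := (List.takeWhile_append_dropWhile).symm
        have hsep : ∀ (h : d ≠ []), q (d.head h) = true := by
          intro h
          have := List.head_dropWhile_not (fun x => !p x) (l := cs) (by rw [← hd]; exact h)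
          simp only [← hd] at this ⊢
          simp at this
          exact himp _ this
        have : nsplit q (c :: cs) = nsplit q ((c :: t) ++ d) := by
          rw [List.cons_append, ← hcs]
        rw [this, ns_append_sep q (c :: t) d hsep]
        congr 1
        exact ih d.length
          (by rw [hd]; exact lt_of_le_of_lt (List.length_dropWhile_le (fun x => !p x) cs) (by simp)) d rfl

theorem add_filter {α : Type} [BEq α] [LawfulBEq α] (s : List α) (x : α) (p : α → Bool) :
    (PySem.Set.add s x).filter p = if p x then PySem.Set.add (s.filter p) x else s.filter p := by
  by_cases hm : PySem.Set.contains s x = true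
  · have hx : x ∈ s := by simpa [PySem.Set.contains] using hm
    rw [PySem.Set.add, if_pos hm]
    by_cases hp : p x = true
    · rw [if_pos hp, PySem.Set.add, if_pos]
      simp [PySem.Set.contains, List.mem_filter, hx, hp]
    · rw [if_neg hp]
  · have hx : x ∉ s := by simpa [PySem.Set.contains] using hm
    rw [PySem.Set.add, if_neg hm, List.filter_append]
    by_cases hp : p x = true
    · rw [if_pos hp, PySem.Set.add, if_neg]
      · simp [hp]
      · simp only [PySem.Set.contains, List.contains_eq_mem, List.mem_filter,
          decide_eq_true_eq, not_and]
        intro h; exact absurd h hx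
    · simp [hp]

theorem foldl_add_filter {α : Type} [BEq α] [LawfulBEq α] (l : List α) (s : List α) (p : α → Bool) :
    (List.foldl PySem.Set.add s l).filter p = List.foldl PySem.Set.add (s.filter p) (l.filter p) := by
  induction l generalizing s with
  | nil => simp
  | cons x l ih =>
    rw [List.foldl_cons, ih, add_filter, List.filter_cons]
    by_cases hp : p x = true <;> simp [hp]
def dfrom {α : Type} [BEq α] (seen : List α) : List α → List α
  | [] => []
  | x :: l => if seen.contains x then dfrom seen l else x :: dfrom (x :: seen) l

theorem dfrom_congr {α : Type} [BEq α] [LawfulBEq α] (l : List α) (s t : List α)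
    (h : ∀ x, x ∈ s ↔ x ∈ t) : dfrom s l = dfrom t l := by
  induction l generalizing s t with
  | nil => simp [dfrom]
  | cons x l ih =>
    rw [dfrom, dfrom]
    have : s.contains x = t.contains x := by
      simp [List.contains_eq_mem, h x]
    rw [this]
    by_cases hm : t.contains x = true
    · simp only [hm, if_true]
      exact ih s t h
    · simp only [hm, if_false, Bool.false_eq_true]
      congr 1
      exact ih _ _ (fun y => by simp [h y])

theorem foldl_add_eq_append_dfrom {α : Type} [BEq α] [LawfulBEq α] (l : List α) : ∀ (s : List α),
    List.foldl PySem.Set.add s l = s ++ dfrom s l := by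
  induction l with
  | nil => intro s; simp [dfrom]
  | cons x l ih =>
    intro s
    rw [List.foldl_cons, dfrom]
    by_cases hm : s.contains x = true
    · rw [if_pos hm, PySem.Set.add, if_pos (by simpa [PySem.Set.contains] using hm), ih]
    · rw [if_neg hm, PySem.Set.add, if_neg (by simpa [PySem.Set.contains] using hm), ih]
      rw [dfrom_congr l (s ++ [x]) (x :: s) (by intro y; simp; tauto)]
      simp

theorem foldl_add_dfrom {α : Type} [BEq α] [LawfulBEq α] (b : List α) : ∀ (seen s : List α),
    (∀ x ∈ seen, x ∈ s) →
    List.foldl PySem.Set.add s (dfrom seen b) = List.foldl PySem.Set.add s b := by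
  induction b with
  | nil => intro seen s _; simp [dfrom]
  | cons x b ih =>
    intro seen s hsub
    rw [dfrom, List.foldl_cons]
    by_cases hm : seen.contains x = true
    · rw [if_pos hm, PySem.Set.add, if_pos]
      · exact ih seen s hsub
      · simp only [PySem.Set.contains, List.contains_eq_mem, decide_eq_true_eq]
        exact hsub x (by simpa using hm)
    · rw [if_neg hm, List.foldl_cons]
      exact ih (x :: seen) (PySem.Set.add s x) (by
        intro y hy
        rcases List.mem_cons.1 hy with rfl | hy
        · simp [PySem.Set.add]; split <;> simp_all [PySem.Set.contains]
        · have := hsub y hy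
          simp [PySem.Set.add]; split <;> simp_all)

theorem union_ofList {α : Type} [BEq α] [LawfulBEq α] (a b : List α) :
    PySem.Set.union (PySem.Set.ofList a) (PySem.Set.ofList b) = PySem.Set.ofList (a ++ b) := by
  rw [PySem.Set.union, PySem.Set.update, PySem.Set.ofList, PySem.Set.ofList, PySem.Set.ofList]
  rw [List.foldl_append]
  rw [show List.foldl PySem.Set.add PySem.Set.empty b = dfrom (PySem.Set.empty : List α) b from by
    rw [foldl_add_eq_append_dfrom]; simp [PySem.Set.empty]]
  exact foldl_add_dfrom b PySem.Set.empty _ (by simp [PySem.Set.empty])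

theorem foldl_bFlush_eq (ws : List (List Char)) : ∀ (r : PySem.Set String),
    List.foldl bFlush r ws =
      List.foldl PySem.Set.add r
        ((ws.filter (fun w => !w.isEmpty && !STOP_WORDS.contains (String.ofList w))).map String.ofList) := by
  induction ws with
  | nil => intro r; simp
  | cons w ws ih =>
    intro r
    rw [List.foldl_cons, List.filter_cons]
    by_cases he : w.isEmpty
    · rw [bFlush, if_pos he]
      simp only [he, Bool.not_true, Bool.false_and, if_false, Bool.false_eq_true]
      exact ih r
    · by_cases hs : STOP_WORDS.contains (String.ofList w) = true
      · rw [bFlush, if_neg (by simp [he]), if_pos hs]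
        simp only [he, hs, Bool.not_true, Bool.and_false, if_false, Bool.not_false, Bool.true_and, Bool.false_eq_true]
        exact ih r
      · rw [bFlush, if_neg (by simp [he]), if_neg hs]
        simp only [he, hs, Bool.not_false, Bool.true_and, Bool.not_true, if_pos]
        rw [List.map_cons, List.foldl_cons]
        exact ih _

theorem fold_flush_noc (cs : List Char) (r : PySem.Set String) :
    List.foldl bFlush r
        (cs.takeWhile (fun x => !symB x) :: nsplit symB (cs.dropWhile (fun x => !symB x))) =
      List.foldl bFlush r (nsplit symB cs) := by
  conv_rhs => rw [ns_decomp symB cs]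
  by_cases ht : cs.takeWhile (fun x => !symB x) = []
  · rw [ht]
    simp [bFlush]
  · rw [if_neg ht]
    rfl

theorem bInner_spec : ∀ (cs : List Char) (res : PySem.Set String) (cur : List Char),
    bInner res cur cs =
      List.foldl bFlush res
        ((cur ++ cs.takeWhile (fun x => !symB x)) :: nsplit symB (cs.dropWhile (fun x => !symB x))) := by
  intro cs
  induction cs with
  | nil => intro res cur; simp [bInner, nsplit_nil]
  | cons c cs ih =>
    intro res cur
    rw [bInner]
    simp only [show ("-_./&()+,".toList.contains c) = symB c from rfl]
    by_cases hc : symB c = true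
    · rw [if_pos hc, ih]
      have h1 : (!symB c) = false := by simp [hc]
      rw [List.takeWhile_cons, List.dropWhile_cons]
      simp only [h1, Bool.false_eq_true, if_false, List.append_nil, List.foldl_cons]
      rw [nsplit_cons, if_pos hc, ← fold_flush_noc cs (bFlush res cur), List.foldl_cons]
      simp
    · rw [if_neg hc, ih]
      have h1 : (!symB c) = true := by simp [hc]
      rw [List.takeWhile_cons, List.dropWhile_cons]
      simp only [h1, if_true, ite_true]
      rw [List.append_assoc]
      rfl

-- spaced text characterization (A side)
theorem spaced_split (L : List Char) :
    PySem.Chars.split₀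
        ((("-_./&()+,".toList).foldl (fun s ch => PySem.Chars.replace s [ch] [' ']) L)) =
      nsplit qB L := by
  have hlit : "-_./&()+,".toList = ['-','_','.','/','&','(',')','+',','] := by decide
  rw [hlit]
  simp only [List.foldl_cons, List.foldl_nil]
  rw [split₀_eq]
  rw [replace_single, replace_single, replace_single, replace_single, replace_single,
    replace_single, replace_single, replace_single, replace_single]
  rw [map1 _ (by decide), map1 _ (by decide), map1 _ (by decide), map1 _ (by decide),
    map1 _ (by decide), map1 _ (by decide), map1 _ (by decide), map1 _ (by decide),
    map1 _ (by decide)]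
  apply ns_congr
  intro c _
  rw [Bool.eq_iff_iff]
  simp [qB, symB, List.contains_eq_mem, hlit]
  tauto
-- compact text characterization (A side)
theorem compact_split (L : List Char) :
    PySem.Chars.split₀
        (PySem.Chars.replace (PySem.Chars.replace (PySem.Chars.replace L ['-'] []) ['_'] []) ['.'] []) =
      ((nsplit PySem.Chars.isspace L).map (List.filter (fun c => !delB c))).filter
        (fun g => !g.isEmpty) := by
  rw [replace_del, replace_del, replace_del, List.filter_filter, List.filter_filter]
  rw [List.filter_congr (q := fun c => !delB c) (by
    intro x _
    rw [Bool.eq_iff_iff]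
    simp [delB, List.contains_eq_mem, show "-_.".toList = ['-','_','.'] by decide]
    tauto)]
  rw [split₀_eq]
  exact filt _ _ (by
    intro x hx
    have : ¬ delB x = true := by
      intro hd
      simp [delB, List.contains_eq_mem, show "-_.".toList = ['-','_','.'] by decide] at hd
      rcases hd with rfl | rfl | rfl <;> exact absurd hx (by decide)
    simp [this]) L
theorem flat_sym (L : List Char) :
    nsplit qB L = (nsplit PySem.Chars.isspace L).flatMap (nsplit symB) := by
  rw [flat PySem.Chars.isspace qB (fun c h => by simp [qB, h]) L]
  simp only [List.flatMap]
  rw [List.map_congr_left (fun g hg => ns_congr qB symB g (fun c hc => by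
    have h1 := ns_members _ _ g hg c hc
    simp [qB, h1]))]

theorem foldl_flush_flatMap (h : List Char → List (List Char)) (gs : List (List Char)) :
    ∀ r, gs.foldl (fun r g => (h g).foldl bFlush r) r = (gs.flatMap h).foldl bFlush r := by
  induction gs with
  | nil => intro r; simp
  | cons g gs ih => intro r; rw [List.flatMap_cons, List.foldl_append, List.foldl_cons, ih]

theorem toList_spaced (t1 : String) :
    (("-_./&()+,".toList).foldl (fun s ch => PySem.Str.replace s (String.ofList [ch]) " ") t1).toList =
      ("-_./&()+,".toList).foldl (fun s ch => PySem.Chars.replace s [ch] [' ']) t1.toList := by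
  rw [show "-_./&()+,".toList = ['-','_','.','/','&','(',')','+',','] from by decide]
  simp only [List.foldl_cons, List.foldl_nil, PySem.Str.toList_replace, String.toList_ofList,
    show (" " : String).toList = [' '] from by decide]

theorem main_some (t : String) (ht : ¬ (t == "") = true) :
    normalize_specialization (some t) = normalize_specialization_alt (some t) := by
  simp only [normalize_specialization, normalize_specialization_alt]
  rw [if_neg ht, if_neg ht]
  set L : List Char := (PySem.Str.lower t).toList with hL
  -- A side word lists
  have hSw : PySem.Str.split₀
      (("-_./&()+,".toList).foldl (fun s ch => PySem.Str.replace s (String.ofList [ch]) " ") (PySem.Str.lower t)) =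
      ((nsplit PySem.Chars.isspace L).flatMap (nsplit symB)).map String.ofList := by
    rw [PySem.Str.split₀, toList_spaced, spaced_split, ← hL, flat_sym]
  have hCw : PySem.Str.split₀
      (PySem.Str.replace (PySem.Str.replace (PySem.Str.replace (PySem.Str.lower t) "-" "") "_" "") "." "") =
      (((nsplit PySem.Chars.isspace L).map (List.filter (fun c => !delB c))).filter
        (fun g => !g.isEmpty)).map String.ofList := by
    rw [PySem.Str.split₀]
    rw [PySem.Str.toList_replace, PySem.Str.toList_replace, PySem.Str.toList_replace]
    rw [show ("-" : String).toList = ['-'] from by decide,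
        show ("_" : String).toList = ['_'] from by decide,
        show ("." : String).toList = ['.'] from by decide,
        show ("" : String).toList = [] from by decide]
    rw [compact_split]
  rw [hSw, hCw]
  -- B side
  have htok : PySem.Str.split₀ (PySem.Str.lower t) = (nsplit PySem.Chars.isspace L).map String.ofList := by
    rw [PySem.Str.split₀, split₀_eq]
  rw [htok]
  rw [List.foldl_map, List.foldl_map]
  simp only [String.toList_ofList]
  have hinner : ∀ (r : PySem.Set String) (g : List Char),
      bInner r [] g = (nsplit symB g).foldl bFlush r := by
    intro r g
    rw [bInner_spec, List.nil_append, fold_flush_noc]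
  simp only [hinner]
  rw [foldl_flush_flatMap (nsplit symB) (nsplit PySem.Chars.isspace L) PySem.Set.empty]
  rw [show (fun (res : PySem.Set String) (g : List Char) =>
        bFlush res (g.filter (fun c => !(("-_.".toList).contains c)))) =
      (fun res g => bFlush res (g.filter (fun c => !delB c))) from rfl]
  rw [← List.foldl_map (f := List.filter (fun c => !delB c)) (g := bFlush)]
  rw [← List.foldl_append]
  rw [foldl_bFlush_eq]
  -- A side to ofList form
  rw [union_ofList, PySem.Set.diff]
  rw [show (PySem.Set.ofList
        (((nsplit PySem.Chars.isspace L).flatMap (nsplit symB)).map String.ofList ++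
          (((nsplit PySem.Chars.isspace L).map (List.filter fun c => !delB c)).filter
            (fun g => !g.isEmpty)).map String.ofList)) =
      List.foldl PySem.Set.add PySem.Set.empty
        (((nsplit PySem.Chars.isspace L).flatMap (nsplit symB)).map String.ofList ++
          (((nsplit PySem.Chars.isspace L).map (List.filter fun c => !delB c)).filter
            (fun g => !g.isEmpty)).map String.ofList) from rfl]
  rw [foldl_add_filter]
  rw [show (PySem.Set.empty : List String).filter (fun x => !STOP_WORDS.contains x) = PySem.Set.empty from rfl]
  -- both are foldl add empty over a filtered list; show the lists agree
  apply congrArg (List.foldl PySem.Set.add PySem.Set.empty)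
  simp only [List.filter_append, List.map_append, List.filter_map, List.filter_filter]
  refine congrArg₂ (· ++ ·) ?_ ?_
  · apply congrArg
    apply List.filter_congr
    intro w hw
    have hne : w ≠ [] := by
      rcases List.mem_flatMap.1 hw with ⟨g, hg, hwg⟩
      exact ns_ne _ _ _ hwg
    simp [Function.comp, hne]
  · apply congrArg
    apply congrArg
    apply List.filter_congr
    intro g _
    simp only [Function.comp]
    exact Bool.and_comm _ _

-- ===== VERDICT (by name: the statement is the Claim_ definition above) =====
theorem normalize_specialization_spec : Claim_equal_normalize_specialization := by
  unfold Claim_equal_normalize_specialization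
  intro text _
  unfold Spec_normalize_specialization
  cases text with
  | none => rfl
  | some t =>
    by_cases ht : (t == "") = true
    · simp only [normalize_specialization, normalize_specialization_alt]
      rw [if_pos ht, if_pos ht]
    · exact main_some t ht
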